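-- pv_equiv track=rewrite | github.com/Hero0963/poker_game | py_poker13tw/cp_check_poker_hand.py | is_five_of_gold_tiger
-- ===== SOURCE A (Python) =====
-- from typing import List
-- import collections
--
-- def get_card_suit(card):
--     suits = ['黑桃', '愛心', '方塊', '梅花']
--     return suits[(card - 1) // 13]
--
-- def get_card_rank(card):
--     ranks = ['2', '3', '4', '5', '6', '7', '8', '9', '10', 'J', 'Q', 'K', 'A']
--     return ranks[(card - 1) % 13]
--
-- def convert_rank_value(rank):
--     rk = ['', '', '2', '3', '4', '5', '6', '7', '8', '9', '10', 'J', 'Q', 'K', 'A']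
--     return rk.index(rank)
--
-- def is_five_of_gold_tiger(cards: List[int], gold: int) -> bool:
--     if len(cards) != 5:
--         return False
--
--     record_rk_value = collections.defaultdict(int)
--     for card in cards:
--         suit, rank = get_card_suit(card), get_card_rank(card)
--         rk_value = convert_rank_value(rank)
--         record_rk_value[rk_value] += 1
--
--     if record_rk_value[gold] >= 4:
--         return True
--
--     return False
-- ===== SOURCE B (Python) =====
-- def is_five_of_gold_tiger(cards, gold):
--     if len(cards) != 5:
--         return False
--     rks = [(c - 1) % 13 + 2 for c in cards]
--     # skip the leading run of gold ranks; position i (if any) is the one mismatch allowed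
--     i = 0
--     while i < 5 and rks[i] == gold:
--         i += 1
--     # every rank after the single allowed mismatch must be gold
--     return all(r == gold for r in rks[i + 1:])
-- ===== Notes on version B (the rewrite author's own statement) =====
-- stated objective: alternative
-- what changed: Replaces A's defaultdict histogram + table lookups by a no-counting staged scan: map cards to closed-form rank values, skip the leading run of gold ranks, treat the first mismatch as the single one allowed, and verify all remaining ranks are gold.
import Mathlib
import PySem

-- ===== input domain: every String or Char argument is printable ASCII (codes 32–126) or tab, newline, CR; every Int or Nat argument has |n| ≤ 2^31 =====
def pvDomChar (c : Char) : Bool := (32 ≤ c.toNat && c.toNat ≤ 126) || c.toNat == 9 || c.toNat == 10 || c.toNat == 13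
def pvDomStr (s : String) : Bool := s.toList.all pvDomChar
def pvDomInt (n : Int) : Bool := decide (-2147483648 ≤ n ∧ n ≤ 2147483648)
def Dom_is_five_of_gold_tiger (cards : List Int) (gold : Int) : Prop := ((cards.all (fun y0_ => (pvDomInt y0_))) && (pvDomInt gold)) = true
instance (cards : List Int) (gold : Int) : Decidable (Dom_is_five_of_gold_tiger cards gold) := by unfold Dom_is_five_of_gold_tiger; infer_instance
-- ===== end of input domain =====

-- B replaces A's defaultdict histogram + table lookups by a no-counting staged scan:
-- map to closed-form rank values, skip the leading run of golds, allow that one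
-- mismatch and verify all remaining ranks are gold (objective: alternative).


-- ===== PORT A =====
def pvSuits : List String := ["黑桃", "愛心", "方塊", "梅花"]
def pvRanks : List String := ["2", "3", "4", "5", "6", "7", "8", "9", "10", "J", "Q", "K", "A"]
def pvRkTable : List String := ["", "", "2", "3", "4", "5", "6", "7", "8", "9", "10", "J", "Q", "K", "A"]

-- loop body of A: compute suit (IndexError outside Pre_, hence the .getD "" default is
-- never the value actually used inside Pre_), rank, rk_value, then defaultdict increment
def pvBodyA (d : PySem.Dict Int Int) (card : Int) : PySem.Dict Int Int :=
  let _suit := (PySem.List.pyGet? pvSuits (PySem.Int.floordiv (card - 1) 13)).getD ""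
  let rank := (PySem.List.pyGet? pvRanks (PySem.Int.mod (card - 1) 13)).getD ""
  let rk_value := (PySem.List.index? pvRkTable rank).getD 0
  d.modify rk_value 0 (· + 1)

def is_five_of_gold_tiger (cards : List Int) (gold : Int) : Bool :=
  if cards.length ≠ 5 then false
  else
    let record := cards.foldl pvBodyA PySem.Dict.empty
    if 4 ≤ record.getD gold 0 then true else false

-- ===== PORT B =====
-- B: map to rank values; the while loop skipping leading golds is dropWhile;
-- rks[i+1:] is drop 1 of the remainder; all(...) is List.all
def is_five_of_gold_tiger_alt (cards : List Int) (gold : Int) : Bool :=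
  if cards.length ≠ 5 then false
  else
    let rks := cards.map (fun c => PySem.Int.mod (c - 1) 13 + 2)
    ((rks.dropWhile (· == gold)).drop 1).all (· == gold)

-- ===== PRECONDITION & SPEC =====
-- Pre_ excludes exactly the inputs where A raises IndexError: a 5-card hand with a
-- card outside [-51, 52] (suits[(card-1)//13] out of range, Python negative indexing included).
def Pre_is_five_of_gold_tiger (cards : List Int) (gold : Int) : Prop :=
  cards.length = 5 → ∀ c ∈ cards, -51 ≤ c ∧ c ≤ 52
instance (cards : List Int) (gold : Int) : Decidable (Pre_is_five_of_gold_tiger cards gold) := by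
  unfold Pre_is_five_of_gold_tiger; infer_instance

def pvWitness_is_five_of_gold_tiger : List Int × Int := ([1, 14, 27, 40, 5], 2)

def Spec_is_five_of_gold_tiger (cards : List Int) (gold : Int) (out : Bool) : Prop :=
  out = is_five_of_gold_tiger_alt cards gold
instance (cards : List Int) (gold : Int) (out : Bool) : Decidable (Spec_is_five_of_gold_tiger cards gold out) := by
  unfold Spec_is_five_of_gold_tiger; infer_instance

-- ===== CLAIM (what is proved, stated in full; the proofs are below) =====
def Claim_equal_is_five_of_gold_tiger : Prop := ∀ (cards : List Int) (gold : Int), Dom_is_five_of_gold_tiger cards gold → Pre_is_five_of_gold_tiger cards gold → Spec_is_five_of_gold_tiger cards gold (is_five_of_gold_tiger cards gold)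

-- ===== LEMMAS AND PROOFS =====

-- A's rank-value computation equals the closed form (c-1) mod 13 + 2, for every Int c
theorem pvBodyA_eq (d : PySem.Dict Int Int) (c : Int) :
    pvBodyA d c = d.modify (PySem.Int.mod (c - 1) 13 + 2) 0 (· + 1) := by
  have hme : PySem.Int.mod (c - 1) 13 = (c - 1) % 13 :=
    PySem.Int.mod_eq_emod_of_pos (by norm_num)
  have h0 : 0 ≤ PySem.Int.mod (c - 1) 13 := by
    rw [hme]; exact Int.emod_nonneg _ (by norm_num)
  have h13 : PySem.Int.mod (c - 1) 13 < 13 := by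
    rw [hme]; exact Int.emod_lt_of_pos _ (by norm_num)
  unfold pvBodyA
  set m := PySem.Int.mod (c - 1) 13 with hm
  interval_cases m <;> rfl

theorem foldA_eq (cards : List Int) (d : PySem.Dict Int Int) :
    cards.foldl pvBodyA d
      = (cards.map (fun c => PySem.Int.mod (c - 1) 13 + 2)).foldl
          (fun d x => d.modify x 0 (· + 1)) d := by
  induction cards generalizing d with
  | nil => rfl
  | cons c cs ih => simp [List.foldl_cons, pvBodyA_eq, ih]

-- B's skip-then-verify scan decides "at most one non-gold element"
theorem dropWhile_all_eq (g : Int) (l : List Int) :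
    (((l.dropWhile (· == g)).drop 1).all (· == g))
      = decide (l.countP (fun x => !(x == g)) ≤ 1) := by
  induction l with
  | nil => simp
  | cons a t ih =>
    by_cases h : a = g
    · subst h
      simp only [List.dropWhile_cons, beq_self_eq_true, if_true, List.countP_cons,
        Bool.not_true, Bool.false_eq_true, if_false] at *
      simpa using ih
    · have hb : (a == g) = false := by simp [h]
      simp only [List.dropWhile_cons, hb, Bool.false_eq_true, if_false, List.drop_succ_cons,
        List.drop_zero, List.countP_cons, Bool.not_false, if_true]
      rw [Bool.eq_iff_iff, List.all_eq_true, decide_eq_true_iff]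
      constructor <;> intro hx
      · have : t.countP (fun x => !(x == g)) = 0 := by
          rw [List.countP_eq_zero]
          intro x hm
          simp [hx x hm]
        omega
      · have h1 : t.countP (fun x => !(x == g)) = 0 := by omega
        intro x hm
        by_contra hne
        have hxg : (!(x == g)) = true := by simpa using hne
        have := (List.countP_eq_zero.mp h1) x hm
        simp_all
    
theorem is_five_of_gold_tiger_spec : Claim_equal_is_five_of_gold_tiger := by
  intro cards gold _ _
  unfold Spec_is_five_of_gold_tiger is_five_of_gold_tiger is_five_of_gold_tiger_alt
  by_cases h : cards.length = 5
  · simp only [h, ne_eq, not_true_eq_false, if_false]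
    rw [foldA_eq, PySem.Dict.getD_foldl_modify_add_one, PySem.Dict.getD_empty]
    set rks := cards.map (fun c => PySem.Int.mod (c - 1) 13 + 2) with hrks
    rw [dropWhile_all_eq]
    have hc : rks.count gold = rks.countP (fun x => x == gold) := rfl
    have hlen : rks.length = 5 := by rw [hrks, List.length_map, h]
    have hsplit : rks.countP (fun x => x == gold) + rks.countP (fun x => !(x == gold))
        = rks.length := by
      induction rks with
      | nil => rfl
      | cons a t iht =>
        simp only [List.countP_cons, List.length_cons]
        by_cases ha : (a == gold) = true <;> simp [ha] <;> omega
    by_cases h4 : 4 ≤ (rks.count gold : Int)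
    · rw [if_pos (by rw [zero_add]; exact h4)]
      have : rks.countP (fun x => !(x == gold)) ≤ 1 := by
        have h4n : 4 ≤ rks.count gold := by exact_mod_cast h4
        rw [hc] at h4n; omega
      simp [this]
    · rw [if_neg (by rw [zero_add]; exact h4)]
      have : ¬ rks.countP (fun x => !(x == gold)) ≤ 1 := by
        intro hle
        apply h4
        have : 4 ≤ rks.count gold := by rw [hc]; omega
        exact_mod_cast this
      simp [this]
  · simp [h]
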